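-- pv_equiv track=rewrite | github.com/oscos/codewars | python/remove_the_minimum.py | remove_smallest
-- ===== SOURCE A (Python) =====
-- def remove_smallest(l):
--     ls = sorted(l)
--     flag = True
--     result = []
--
--     for k in l:
--         if k == ls[0] and flag:
--             flag = False
--             continue
--         else:
--             result.append(k)
--     return result
-- ===== SOURCE B (Python) =====
-- def remove_smallest(l):
--     if not l:
--         return []
--     i = l.index(min(l))
--     return l[:i] + l[i+1:]
-- ===== Notes on version B (the rewrite author's own statement) =====
-- stated objective: simpler
-- what changed: Replaces sorting the whole list and scanning with a skip-flag by computing the first index of min(l) once and concatenating the two slices around it.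
import Mathlib
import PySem

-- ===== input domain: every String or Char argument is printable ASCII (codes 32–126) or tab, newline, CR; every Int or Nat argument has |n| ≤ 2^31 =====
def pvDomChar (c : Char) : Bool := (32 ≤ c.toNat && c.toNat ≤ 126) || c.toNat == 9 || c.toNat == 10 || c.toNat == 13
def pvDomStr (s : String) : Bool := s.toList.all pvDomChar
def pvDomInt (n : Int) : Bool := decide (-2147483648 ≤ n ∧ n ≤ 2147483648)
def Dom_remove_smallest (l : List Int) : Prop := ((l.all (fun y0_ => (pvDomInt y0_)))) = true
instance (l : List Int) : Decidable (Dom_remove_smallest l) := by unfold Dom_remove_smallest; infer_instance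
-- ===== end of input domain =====

-- B computes the first index of the minimum once and returns the slice-concatenation
-- around it, instead of sorting the list and scanning with a skip-flag (objective: simpler).

-- ===== PORT A =====
-- ls[0] is evaluated only inside the loop body (so never on an empty l); ported as pyGet? ls 0.
def remove_smallest (l : List Int) : List Int :=
  let ls := PySem.List.sorted l (fun x => x) false
  (l.foldl (fun (st : Bool × List Int) k =>
      if PySem.List.pyGet? ls 0 = some k ∧ st.1 = true then (false, st.2)
      else (st.1, st.2 ++ [k])) (true, [])).2

-- ===== PORT B =====
-- 'if not l: return []'; then i = l.index(min(l)) (both necessarily succeed on nonempty l,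
-- ported via their Option-returning PySem primitives), then l[:i] ++ l[i+1:].
def remove_smallest_alt (l : List Int) : List Int :=
  match l with
  | [] => []
  | _ :: _ =>
    match PySem.List.min? l (fun x => x) with
    | none => []
    | some m =>
      match PySem.List.index? l m with
      | none => []
      | some i =>
          PySem.List.slice l none (some (i : Int)) ++
          PySem.List.slice l (some ((i : Int) + 1)) none

-- ===== PRECONDITION & SPEC =====
def Spec_remove_smallest (l : List Int) (out : List Int) : Prop := out = remove_smallest_alt l
instance (l : List Int) (out : List Int) : Decidable (Spec_remove_smallest l out) := by unfold Spec_remove_smallest; infer_instance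

-- ===== CLAIM (what is proved, stated in full; the proofs are below) =====
def Claim_equal_remove_smallest : Prop := ∀ (l : List Int), Dom_remove_smallest l → Spec_remove_smallest l (remove_smallest l)

-- ===== LEMMAS AND PROOFS =====

-- A's loop body, abstracted over the comparison value m.
def pvStepA (m : Int) (st : Bool × List Int) (k : Int) : Bool × List Int :=
  if m = k ∧ st.1 = true then (false, st.2) else (st.1, st.2 ++ [k])

theorem pvFoldA_false (m : Int) (l acc : List Int) :
    l.foldl (pvStepA m) (false, acc) = (false, acc ++ l) := by
  induction l generalizing acc with
  | nil => simp
  | cons x t ih => simp [pvStepA, ih]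

theorem pvFoldA_true (m : Int) (l acc : List Int) :
    (l.foldl (pvStepA m) (true, acc)).2 =
      acc ++ (match PySem.List.index? l m with
              | some i => l.take i ++ l.drop (i + 1)
              | none => l) := by
  induction l generalizing acc with
  | nil => simp
  | cons x t ih =>
    by_cases hx : x = m
    · subst hx
      rw [PySem.List.index?_cons_self]
      simp [pvStepA, pvFoldA_false]
    · rw [PySem.List.index?_cons_of_ne t hx]
      have : pvStepA m (true, acc) x = (true, acc ++ [x]) := by
        simp [pvStepA, Ne.symm hx]
      rw [List.foldl_cons, this, ih]
      cases h : PySem.List.index? t m <;> simp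

-- head of sorted = min? (values coincide on Int).
theorem pvSortedHeadMin (x : Int) (t : List Int) :
    ∃ m, PySem.List.sorted (x :: t) (fun y => y) false = m :: (PySem.List.sorted (x :: t) (fun y => y) false).tail
      ∧ PySem.List.min? (x :: t) (fun y => y) = some m := by
  cases hs : PySem.List.sorted (x :: t) (fun y => y) false with
  | nil => exact absurd ((PySem.List.sorted_eq_nil_iff _ _ _).mp hs) (by simp)
  | cons m s =>
    refine ⟨m, by simp, ?_⟩
    cases hm : PySem.List.min? (x :: t) (fun y => y) with
    | none => exact absurd ((PySem.List.min?_eq_none_iff _ _).mp hm) (by simp)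
    | some m' =>
      have hm'mem : m' ∈ (x :: t) := PySem.List.min?_mem hm
      have hmmem : m ∈ (x :: t) := by
        have := PySem.List.mem_sorted (x :: t) (fun y => y) false m
        rw [hs] at this; exact this.mp (by simp)
      have h1 : m ≤ m' := PySem.List.key_head_sorted_le _ _ hs m' hm'mem
      have h2 : m' ≤ m := PySem.List.min?_isMin hm m hmmem
      have : m = m' := le_antisymm h1 h2
      simp [this]

-- ===== VERDICT (by name: the statement is the Claim_ definition above) =====
theorem remove_smallest_spec : Claim_equal_remove_smallest := by
  intro l _
  unfold Spec_remove_smallest remove_smallest remove_smallest_alt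
  cases l with
  | nil => rfl
  | cons x t =>
    obtain ⟨m, hs, hm⟩ := pvSortedHeadMin x t
    have hget : PySem.List.pyGet? (PySem.List.sorted (x :: t) (fun y => y) false) 0 = some m := by
      rw [hs, PySem.List.pyGet?_zero_cons]
    have hbody : (fun (st : Bool × List Int) k =>
        if PySem.List.pyGet? (PySem.List.sorted (x :: t) (fun y => y) false) 0 = some k ∧ st.1 = true
        then (false, st.2) else (st.1, st.2 ++ [k])) = pvStepA m := by
      funext st k; simp only [pvStepA, hget, Option.some.injEq]
    rw [hm]
    have hmem : m ∈ (x :: t) := PySem.List.min?_mem hm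
    cases hi : PySem.List.index? (x :: t) m with
    | none => exact absurd ((PySem.List.index?_eq_none_iff _ _).mp hi) (by simp [hmem])
    | some i =>
      simp only [hbody]
      rw [pvFoldA_true, hi]
      have h1 : PySem.List.slice (x :: t) none (some (i : Int)) = (x :: t).take i :=
        PySem.List.slice_to_natCast (x :: t) i
      have h2 : PySem.List.slice (x :: t) (some ((i : Int) + 1)) none = (x :: t).drop (i + 1) := by
        have : ((i : Int) + 1) = ((i + 1 : Nat) : Int) := by push_cast; ring
        rw [this, PySem.List.slice_from_natCast]
      simp [h1, h2]
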